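-- pv_equiv track=rewrite | github.com/HungNguyen205/PrefixSpan_Algorithm | prefixspan_algo.py | get_frequent_items_S
-- ===== SOURCE A (Python) =====
-- from collections import defaultdict
--
-- def get_frequent_items_S(DB, min_sup_count):
--     """
--     Quét cơ sở dữ liệu chiếu để tìm các mặt hàng phổ biến cho S-Extension
--     (Tức là tạo ra một sự kiện/hóa đơn mới nối tiếp vào chuỗi).
--
--     Input:
--         DB (list): Cơ sở dữ liệu chiếu (Projected Database) hiện tại.
--         min_sup_count (int): Số lượng chuỗi hỗ trợ tối thiểu.
--
--     Output:
--         set: Tập hợp các item phổ biến (đạt min_sup) cho S-Extension.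
--     """
--     counts = defaultdict(int)
--     for partial, remaining in DB:
--         seen = set()
--         # Đối với S-Extension, chúng ta CHỈ đếm các item xuất hiện trong tương lai (remaining)
--         for iset in remaining:
--             for item in iset:
--                 if item not in seen:
--                     seen.add(item)
--                     counts[item] += 1
--
--     return {item for item, count in counts.items() if count >= min_sup_count}
-- ===== SOURCE B (Python) =====
-- def get_frequent_items_S(DB, min_sup_count):
--     # Stage 1 (candidate generation): the universe of items occurring in any
--     # 'remaining' part, first occurrences in order.
--     universe = dict.fromkeys(item for _, remaining in DB
--                                   for iset in remaining
--                                   for item in iset)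
--     # Stage 2 (verification): an item's support is the number of sequences
--     # whose 'remaining' part contains it, counted by a fresh scan of DB.
--     return {item for item in universe
--             if sum(any(item in iset for iset in remaining)
--                    for _, remaining in DB) >= min_sup_count}
-- ===== Notes on version B (the rewrite author's own statement) =====
-- stated objective: alternative
-- what changed: Replaces A's single fused pass (counter dict plus per-row seen set) by a two-stage candidate-generation/verification scheme: first collect the item universe with dict.fromkeys, then compute each item's support by an independent any()-scan over the DB; no counter and no seen set remain.
import Mathlib
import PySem

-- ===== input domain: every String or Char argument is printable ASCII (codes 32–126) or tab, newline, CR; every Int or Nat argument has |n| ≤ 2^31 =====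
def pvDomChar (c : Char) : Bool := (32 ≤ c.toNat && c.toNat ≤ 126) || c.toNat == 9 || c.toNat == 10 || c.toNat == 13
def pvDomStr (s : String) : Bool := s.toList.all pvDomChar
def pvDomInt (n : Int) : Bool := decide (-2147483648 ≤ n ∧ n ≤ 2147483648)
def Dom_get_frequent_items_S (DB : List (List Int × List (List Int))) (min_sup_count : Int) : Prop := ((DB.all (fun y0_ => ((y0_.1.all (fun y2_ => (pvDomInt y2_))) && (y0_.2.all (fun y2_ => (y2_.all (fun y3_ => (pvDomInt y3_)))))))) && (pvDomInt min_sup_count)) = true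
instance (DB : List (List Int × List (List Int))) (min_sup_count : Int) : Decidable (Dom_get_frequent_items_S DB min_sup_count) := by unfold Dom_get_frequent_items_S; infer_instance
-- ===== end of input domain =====

-- B replaces A's single fused counting pass (counter dict + per-row seen set) by a
-- candidate-generation/verification scheme: collect the item universe first, then
-- compute each item's support by its own scan of the DB; alternative decomposition.

-- ===== PORT A =====
-- body of A's inner loop: 'if item not in seen: seen.add(item); counts[item] += 1'
def aStep (st : PySem.Set Int × PySem.Dict Int Int) (item : Int) : PySem.Set Int × PySem.Dict Int Int :=
  if PySem.Set.contains st.1 item then st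
  else (PySem.Set.add st.1 item, st.2.modify item 0 (· + 1))

-- one iteration of 'for partial, remaining in DB' (seen reset to set(), then the two inner loops)
def aRow (counts : PySem.Dict Int Int) (row : List Int × List (List Int)) : PySem.Dict Int Int :=
  (row.2.foldl (fun st iset => iset.foldl aStep st) ((PySem.Set.empty : PySem.Set Int), counts)).2

def get_frequent_items_S (DB : List (List Int × List (List Int))) (min_sup_count : Int) : List Int :=
  let counts : PySem.Dict Int Int := DB.foldl aRow PySem.Dict.empty
  PySem.Set.ofList ((counts.items.filter (fun p => decide (min_sup_count ≤ p.2))).map (·.1))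

-- ===== PORT B =====
-- 'any(item in iset for iset in remaining)'
def bRowHas (item : Int) (remaining : List (List Int)) : Bool :=
  remaining.any (fun iset => iset.contains item)

-- 'sum(any(item in iset for iset in remaining) for _, remaining in DB)'
def bSupport (DB : List (List Int × List (List Int))) (item : Int) : Int :=
  DB.foldl (fun acc r => acc + (if bRowHas item r.2 then 1 else 0)) 0

def get_frequent_items_S_alt (DB : List (List Int × List (List Int))) (min_sup_count : Int) : List Int :=
  -- 'dict.fromkeys(item for _, remaining in DB for iset in remaining for item in iset)'
  let univ : List Int :=
    PySem.List.dedup (DB.flatMap (fun r => r.2.flatMap (fun iset => iset)))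
  PySem.Set.ofList (univ.filter (fun item => decide (min_sup_count ≤ bSupport DB item)))

-- ===== PRECONDITION & SPEC =====
def Spec_get_frequent_items_S (DB : List (List Int × List (List Int))) (min_sup_count : Int) (out : List Int) : Prop := out = get_frequent_items_S_alt DB min_sup_count
instance (DB : List (List Int × List (List Int))) (min_sup_count : Int) (out : List Int) : Decidable (Spec_get_frequent_items_S DB min_sup_count out) := by unfold Spec_get_frequent_items_S; infer_instance

-- ===== CLAIM (what is proved, stated in full; the proofs are below) =====
def Claim_equal_get_frequent_items_S : Prop := ∀ (DB : List (List Int × List (List Int))) (min_sup_count : Int), Dom_get_frequent_items_S DB min_sup_count → Spec_get_frequent_items_S DB min_sup_count (get_frequent_items_S DB min_sup_count)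

-- ===== LEMMAS AND PROOFS =====

-- the stream of items a row contributes, and of the whole database
def flatR (r : List Int × List (List Int)) : List Int := r.2.flatMap (fun iset => iset)
def flatDB (DB : List (List Int × List (List Int))) : List Int := DB.flatMap flatR

-- number of rows whose 'remaining' part contains the item
def rowCnt : List (List Int × List (List Int)) → Int → Int
  | [], _ => 0
  | r :: t, it => (if it ∈ flatR r then 1 else 0) + rowCnt t it

lemma bRowHas_eq (it : Int) (r : List Int × List (List Int)) :
    bRowHas it r.2 = decide (it ∈ flatR r) := by
  apply Bool.eq_iff_iff.mpr
  simp [bRowHas, flatR, List.any_eq_true]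

lemma foldl_rowCnt (DB : List (List Int × List (List Int))) (it : Int) : ∀ acc : Int,
    DB.foldl (fun acc r => acc + (if it ∈ flatR r then 1 else 0)) acc = acc + rowCnt DB it := by
  induction DB with
  | nil => intro acc; simp [rowCnt]
  | cons r t ih =>
      intro acc
      simp only [List.foldl_cons, ih, rowCnt]
      ring

lemma bSupport_eq (DB : List (List Int × List (List Int))) (it : Int) :
    bSupport DB it = rowCnt DB it := by
  unfold bSupport
  have hf : (fun (acc : Int) (r : List Int × List (List Int)) =>
      acc + (if bRowHas it r.2 then 1 else 0))
      = (fun acc r => acc + (if it ∈ flatR r then 1 else 0)) := by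
    funext acc r
    by_cases h : it ∈ flatR r <;> simp [bRowHas_eq, h]
  rw [hf]
  simpa using foldl_rowCnt DB it 0

-- nested foldl over the item-sets of a row = foldl over the row's item stream
lemma foldl_isets_eq_flat (isets : List (List Int)) :
    ∀ st : PySem.Set Int × PySem.Dict Int Int,
    isets.foldl (fun st iset => iset.foldl aStep st) st
      = (isets.flatMap (fun iset => iset)).foldl aStep st := by
  induction isets with
  | nil => intro st; simp
  | cons a t ih => intro st; simp [List.foldl_append, ih]

lemma keys_of_items_shape {counts : PySem.Dict Int Int} {S : List Int} {g : Int → Int}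
    (h : counts.items = S.map (fun it => (it, g it))) : counts.keys = S := by
  simp [PySem.Dict.keys, h, List.map_map, Function.comp_def]

-- mid-row invariant: x = the row prefix already processed, F = items of earlier rows
lemma aStep_fold_items (rest : List Int) :
    ∀ (x F : List Int) (base : Int → Int) (counts : PySem.Dict Int Int),
    counts.items = (PySem.Set.ofList (F ++ x)).map
      (fun it => (it, base it + (if it ∈ x then 1 else 0))) →
    (∀ it, it ∉ F → base it = 0) →
    ((rest.foldl aStep (PySem.Set.ofList x, counts)).2).items
      = (PySem.Set.ofList ((F ++ x) ++ rest)).map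
          (fun it => (it, base it + (if it ∈ x ++ rest then 1 else 0))) := by
  induction rest with
  | nil => intro x F base counts hitems h0; simpa using hitems
  | cons a rest ih =>
      intro x F base counts hitems h0
      have hkeys : counts.keys = PySem.Set.ofList (F ++ x) := keys_of_items_shape hitems
      have hnd : counts.keys.Nodup := by rw [hkeys]; exact PySem.Set.nodup_ofList _
      have hstep : aStep (PySem.Set.ofList x, counts) a
          = if PySem.Set.contains (PySem.Set.ofList x) a
            then (PySem.Set.ofList x, counts)
            else (PySem.Set.add (PySem.Set.ofList x) a, counts.insert a (counts.getD a 0 + 1)) := by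
        simp [aStep, PySem.Dict.modify]
      by_cases ha : a ∈ x
      · -- a already seen in this row: the step is a no-op
        have hca : PySem.Set.contains (PySem.Set.ofList x) a = true := by
          rw [PySem.Set.contains_iff, PySem.Set.mem_ofList]; exact ha
        have hfold : (a :: rest).foldl aStep (PySem.Set.ofList x, counts)
            = rest.foldl aStep (PySem.Set.ofList x, counts) := by
          simp [List.foldl_cons, hstep, ha]
        rw [hfold]
        have hofl : PySem.Set.ofList (x ++ [a]) = PySem.Set.ofList x := by
          rw [PySem.Set.ofList_append_singleton,
              PySem.Set.add_of_mem (by rw [PySem.Set.mem_ofList]; exact ha)]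
        have hitems' : counts.items = (PySem.Set.ofList (F ++ (x ++ [a]))).map
            (fun it => (it, base it + (if it ∈ x ++ [a] then 1 else 0))) := by
          rw [← List.append_assoc, PySem.Set.ofList_append_singleton,
              PySem.Set.add_of_mem (by rw [PySem.Set.mem_ofList]; exact List.mem_append.mpr (Or.inr ha))]
          rw [hitems]
          apply List.map_congr_left
          intro it _
          by_cases hix : it ∈ x
          · simp [hix]
          · have : it ∉ x ++ [a] := by
              simp only [List.mem_append, List.mem_singleton]
              rintro (h | rfl) <;> [exact hix h; exact hix ha]
            simp [hix, this]
        have key := ih (x ++ [a]) F base counts hitems' h0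
        rw [hofl] at key
        rw [key]
        have hl : (F ++ (x ++ [a])) ++ rest = (F ++ x) ++ (a :: rest) := by
          simp [List.append_assoc]
        have hl2 : (x ++ [a]) ++ rest = x ++ (a :: rest) := by simp
        rw [hl, hl2]
      · -- a is new in this row
        have hca : PySem.Set.contains (PySem.Set.ofList x) a = false := by
          simp only [PySem.Set.contains_eq_listContains]
          simp [PySem.Set.mem_ofList, ha]
        have hadd : (PySem.Set.ofList x).add a = PySem.Set.ofList (x ++ [a]) :=
          (PySem.Set.ofList_append_singleton x a).symm
        have hfold : (a :: rest).foldl aStep (PySem.Set.ofList x, counts)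
            = rest.foldl aStep (PySem.Set.ofList (x ++ [a]),
                counts.insert a (counts.getD a 0 + 1)) := by
          simp only [List.foldl_cons, hstep, hca, Bool.false_eq_true, if_false]
          rw [PySem.Set.ofList_append_singleton,
              PySem.Set.add_of_not_mem (by rw [PySem.Set.mem_ofList]; exact ha)]
        rw [hfold]
        by_cases haF : a ∈ F
        · -- a has a dict entry already: insert overwrites in place
          have hmem : a ∈ PySem.Set.ofList (F ++ x) := by
            rw [PySem.Set.mem_ofList]; exact List.mem_append.mpr (Or.inl haF)
          have hcont : counts.contains a = true := by
            rw [PySem.Dict.contains_iff_mem_keys, hkeys]; exact hmem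
          have hgd : counts.getD a 0 = base a := by
            have hin : (a, base a + (if a ∈ x then 1 else 0)) ∈ counts.items := by
              rw [hitems]; exact List.mem_map.mpr ⟨a, hmem, rfl⟩
            have := PySem.Dict.getD_of_mem_items counts hin hnd 0
            simpa [ha] using this
          have hofl : PySem.Set.ofList (F ++ (x ++ [a])) = PySem.Set.ofList (F ++ x) := by
            rw [← List.append_assoc, PySem.Set.ofList_append_singleton,
                PySem.Set.add_of_mem hmem]
          have hitems' : (counts.insert a (counts.getD a 0 + 1)).items
              = (PySem.Set.ofList (F ++ (x ++ [a]))).map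
                  (fun it => (it, base it + (if it ∈ x ++ [a] then 1 else 0))) := by
            rw [PySem.Dict.items_insert_of_contains _ _ hcont, hitems, hofl, List.map_map]
            apply List.map_congr_left
            intro it _
            by_cases hia : it = a
            · subst hia
              simp [Function.comp, hgd, ha]
            · have : (it == a) = false := by simp [hia]
              simp [Function.comp, this, hia]
          have key := ih (x ++ [a]) F base _ hitems' h0
          rw [key]
          have hl : (F ++ (x ++ [a])) ++ rest = (F ++ x) ++ (a :: rest) := by
            simp [List.append_assoc]
          have hl2 : (x ++ [a]) ++ rest = x ++ (a :: rest) := by simp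
          rw [hl, hl2]
        · -- a is entirely new: the entry (a, 1) is appended
          have hnmem : a ∉ PySem.Set.ofList (F ++ x) := by
            rw [PySem.Set.mem_ofList, List.mem_append]
            rintro (h | h) <;> [exact haF h; exact ha h]
          have hcont : counts.contains a = false := by
            rw [← Bool.not_eq_true, PySem.Dict.contains_iff_mem_keys, hkeys]
            exact hnmem
          have hgd : counts.getD a 0 = 0 := PySem.Dict.getD_of_not_contains counts 0 hcont
          have hofl : PySem.Set.ofList (F ++ (x ++ [a]))
              = PySem.Set.ofList (F ++ x) ++ [a] := by
            rw [← List.append_assoc, PySem.Set.ofList_append_singleton,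
                PySem.Set.add_of_not_mem hnmem]
          have hitems' : (counts.insert a (counts.getD a 0 + 1)).items
              = (PySem.Set.ofList (F ++ (x ++ [a]))).map
                  (fun it => (it, base it + (if it ∈ x ++ [a] then 1 else 0))) := by
            rw [PySem.Dict.items_insert_of_not_contains _ _ hcont, hitems, hofl, hgd,
                List.map_append]
            congr 1
            · apply List.map_congr_left
              intro it hmem
              have hia : it ≠ a := fun h => hnmem (h ▸ hmem)
              by_cases hix : it ∈ x
              · simp [hix]
              · have : it ∉ x ++ [a] := by
                  simp only [List.mem_append, List.mem_singleton]
                  rintro (h | h) <;> [exact hix h; exact hia h]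
                simp [hix, this]
            · have h0a : base a = 0 := h0 a haF
              simp [h0a]
          have key := ih (x ++ [a]) F base _ hitems' h0
          rw [key]
          have hl : (F ++ (x ++ [a])) ++ rest = (F ++ x) ++ (a :: rest) := by
            simp [List.append_assoc]
          have hl2 : (x ++ [a]) ++ rest = x ++ (a :: rest) := by simp
          rw [hl, hl2]

lemma aRow_items (r : List Int × List (List Int)) (F : List Int) (base : Int → Int)
    (counts : PySem.Dict Int Int)
    (hitems : counts.items = (PySem.Set.ofList F).map (fun it => (it, base it)))
    (h0 : ∀ it, it ∉ F → base it = 0) :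
    (aRow counts r).items = (PySem.Set.ofList (F ++ flatR r)).map
      (fun it => (it, base it + (if it ∈ flatR r then 1 else 0))) := by
  unfold aRow
  rw [foldl_isets_eq_flat]
  have h := aStep_fold_items (flatR r) [] F base counts (by simpa using hitems) h0
  have hempty : (PySem.Set.ofList ([] : List Int)) = (PySem.Set.empty : PySem.Set Int) := rfl
  rw [hempty] at h
  simpa [flatR] using h

lemma foldl_aRow_items (DB : List (List Int × List (List Int))) :
    ∀ (F : List Int) (base : Int → Int) (counts : PySem.Dict Int Int),
    counts.items = (PySem.Set.ofList F).map (fun it => (it, base it)) →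
    (∀ it, it ∉ F → base it = 0) →
    (DB.foldl aRow counts).items = (PySem.Set.ofList (F ++ flatDB DB)).map
      (fun it => (it, base it + rowCnt DB it)) := by
  induction DB with
  | nil => intro F base counts hitems h0; simpa [flatDB, rowCnt] using hitems
  | cons r t ih =>
      intro F base counts hitems h0
      have hrow := aRow_items r F base counts hitems h0
      have h0' : ∀ it, it ∉ F ++ flatR r →
          base it + (if it ∈ flatR r then 1 else 0) = 0 := by
        intro it hm
        rw [List.mem_append] at hm
        push Not at hm
        simp [h0 it hm.1, hm.2]
      have := ih (F ++ flatR r) (fun it => base it + (if it ∈ flatR r then 1 else 0))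
        (aRow counts r) hrow h0'
      rw [List.foldl_cons, this]
      have hl : (F ++ flatR r) ++ flatDB t = F ++ flatDB (r :: t) := by
        simp [flatDB, List.append_assoc]
      rw [hl]
      apply List.map_congr_left
      intro it _
      simp [rowCnt, add_assoc]

-- ===== VERDICT (by name: the statement is the Claim_ definition above) =====
theorem get_frequent_items_S_spec : Claim_equal_get_frequent_items_S := by
  intro DB m _
  unfold Spec_get_frequent_items_S get_frequent_items_S get_frequent_items_S_alt
  dsimp only
  have hchar := foldl_aRow_items DB [] (fun _ => 0) PySem.Dict.empty (by rfl) (fun _ _ => rfl)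
  simp only [List.nil_append, zero_add] at hchar
  rw [hchar, List.filter_map, List.map_map]
  simp only [Function.comp_def, List.map_id']
  rw [PySem.List.dedup_eq_ofList]
  apply congrArg
  apply List.filter_congr
  intro it _
  simp [bSupport_eq]
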